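-- pv_equiv track=rewrite | github.com/lesgreed/WebScriptLess | Main.py | find_transitions
-- ===== SOURCE A (Python) =====
-- def find_transitions(arr):
--     start_indices = []
--     end_indices = []
--
--     for i in range(len(arr) - 1):
--         if arr[i] >= 1 and arr[i+1] < 1:
--             start_indices.append(i+1)
--         elif arr[i] < 1 and arr[i+1] >= 1:
--             end_indices.append(i+1)
--     if not start_indices:
--             start_indices.append(0)
--     if not end_indices:
--             end_indices.append(len(arr) - 1)
--
--
--     return start_indices, end_indices
-- ===== SOURCE B (Python) =====
-- def find_transitions(arr):
--     # Run-based traversal: skip over each maximal run of the thresholded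
--     # (x >= 1) sequence; every boundary between two runs is a transition.
--     starts, ends = [], []
--     n = len(arr)
--     pos = 0
--     while pos < n:
--         flag = arr[pos] >= 1          # flag of the current run
--         k = pos + 1
--         while k < n and (arr[k] >= 1) == flag:
--             k += 1                    # skip to the end of this run
--         if k < n:                     # boundary between this run and the next
--             (starts if flag else ends).append(k)
--         pos = k
--     if not starts:
--         starts.append(0)
--     if not ends:
--         ends.append(n - 1)
--     return starts, ends
-- ===== Notes on version B (the rewrite author's own statement) =====
-- stated objective: alternative
-- what changed: A checks every adjacent pair in one indexed pass appending per pair; B traverses the array run by run (inner loop skips each maximal run of the thresholded sequence) and records one boundary index per run boundary.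
import Mathlib
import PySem

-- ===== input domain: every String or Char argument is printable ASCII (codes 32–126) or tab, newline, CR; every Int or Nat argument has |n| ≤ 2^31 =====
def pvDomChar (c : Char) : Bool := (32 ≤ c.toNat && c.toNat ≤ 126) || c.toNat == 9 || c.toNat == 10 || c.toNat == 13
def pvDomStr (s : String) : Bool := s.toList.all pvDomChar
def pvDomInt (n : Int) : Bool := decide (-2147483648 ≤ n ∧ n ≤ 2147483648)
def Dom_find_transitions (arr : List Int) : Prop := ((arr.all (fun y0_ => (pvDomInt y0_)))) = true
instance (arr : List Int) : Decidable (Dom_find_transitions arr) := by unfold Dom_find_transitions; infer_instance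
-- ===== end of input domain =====

-- B replaces A's single pass over adjacent pairs by a run-by-run traversal (alternative decomposition, same cost).

-- ===== PORT A =====
def find_transitions (arr : List Int) : List Int × List Int :=
  let st := (PySem.List.pyRange 0 (PySem.List.len arr - 1) 1).foldl
    (fun (st : List Int × List Int) i =>
      if PySem.List.pyGetD arr i 0 ≥ 1 ∧ PySem.List.pyGetD arr (i+1) 0 < 1 then
        (st.1 ++ [i+1], st.2)
      else if PySem.List.pyGetD arr i 0 < 1 ∧ PySem.List.pyGetD arr (i+1) 0 ≥ 1 then
        (st.1, st.2 ++ [i+1])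
      else st) ([], [])
  let s := if st.1 = [] then [0] else st.1
  let e := if st.2 = [] then [PySem.List.len arr - 1] else st.2
  (s, e)

-- ===== PORT B =====
-- inner while loop of Source B: skip to the end of the current run
def pvSkipRun (arr : List Int) (n : Nat) (flag : Bool) (k : Nat) : Nat :=
  if k < n ∧ (decide (PySem.List.pyGetD arr (k : Int) 0 ≥ 1)) = flag then
    pvSkipRun arr n flag (k+1)
  else k
termination_by n - k
decreasing_by omega

theorem pvSkipRun_lt (arr : List Int) (n : Nat) (flag : Bool) (k : Nat) :
    k ≤ pvSkipRun arr n flag k := by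
  unfold pvSkipRun
  split
  · exact le_trans (by omega) (pvSkipRun_lt arr n flag (k+1))
  · exact le_refl k
termination_by n - k
decreasing_by omega

-- outer while loop of Source B
def pvOuter (arr : List Int) (n : Nat) (pos : Nat) (starts ends_ : List Int) :
    List Int × List Int :=
  if _h : pos < n then
    let flag := decide (PySem.List.pyGetD arr (pos : Int) 0 ≥ 1)
    let k := pvSkipRun arr n flag (pos+1)
    if k < n then
      if flag then pvOuter arr n k (starts ++ [(k : Int)]) ends_
      else pvOuter arr n k starts (ends_ ++ [(k : Int)])
    else pvOuter arr n k starts ends_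
  else (starts, ends_)
termination_by n - pos
decreasing_by
  all_goals have := pvSkipRun_lt arr n (decide (PySem.List.pyGetD arr (pos : Int) 0 ≥ 1)) (pos+1); omega

def find_transitions_alt (arr : List Int) : List Int × List Int :=
  let n := arr.length
  let st := pvOuter arr n 0 [] []
  let starts := if st.1 = [] then [0] else st.1
  let ends_ := if st.2 = [] then [(n : Int) - 1] else st.2
  (starts, ends_)

-- ===== PRECONDITION & SPEC =====
def Spec_find_transitions (arr : List Int) (out : List Int × List Int) : Prop := out = find_transitions_alt arr
instance (arr : List Int) (out : List Int × List Int) : Decidable (Spec_find_transitions arr out) := by unfold Spec_find_transitions; infer_instance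

-- ===== CLAIM (what is proved, stated in full; the proofs are below) =====
def Claim_equal_find_transitions : Prop := ∀ (arr : List Int), Dom_find_transitions arr → Spec_find_transitions arr (find_transitions arr)

-- ===== LEMMAS AND PROOFS =====

-- threshold flag of element i (proof-side view of the ports' comparisons)
def pvFlag (arr : List Int) (i : Nat) : Bool := decide (arr.getD i 0 ≥ 1)

-- boundary predicates: a "start" / "end" transition at pair (i, i+1)
def pvQS (arr : List Int) (i : Nat) : Bool := pvFlag arr i && !pvFlag arr (i+1)
def pvQE (arr : List Int) (i : Nat) : Bool := !pvFlag arr i && pvFlag arr (i+1)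

-- indices i in [a, b) satisfying q, mapped to i+1
def pvIdx (q : Nat → Bool) (a b : Nat) : List Int :=
  ((List.range' a (b - a)).filter q).map (fun i => (i : Int) + 1)

theorem pvIdx_nil (q : Nat → Bool) (a b : Nat) (h : b ≤ a) : pvIdx q a b = [] := by
  simp [pvIdx, Nat.sub_eq_zero_of_le h]

theorem pvIdx_cons (q : Nat → Bool) (a b : Nat) (h : a < b) :
    pvIdx q a b = (if q a then [(a : Int) + 1] else []) ++ pvIdx q (a+1) b := by
  unfold pvIdx
  rw [show b - a = (b - (a+1)) + 1 by omega, List.range'_succ]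
  by_cases hq : q a = true
  · simp [hq]
  · simp [hq]

theorem pvIdx_concat (q : Nat → Bool) (a b : Nat) (h : a ≤ b) :
    pvIdx q a (b+1) = pvIdx q a b ++ (if q b then [(b : Int) + 1] else []) := by
  unfold pvIdx
  rw [show b + 1 - a = (b - a) + 1 by omega, List.range'_concat,
      show a + 1 * (b - a) = b by omega]
  by_cases hq : q b = true
  · simp [hq]
  · simp [hq]

theorem pvIdx_run (q : Nat → Bool) (b a c : Nat) (hac : a ≤ c)
    (hq : ∀ i, a ≤ i → i < c → q i = false) : pvIdx q a b = pvIdx q c b := by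
  rcases Nat.lt_or_ge a c with hlt | hge
  · have h1 : pvIdx q a b = pvIdx q (a+1) b := by
      rcases Nat.lt_or_ge a b with hab | hab
      · rw [pvIdx_cons q a b hab, hq a le_rfl hlt]
        simp
      · rw [pvIdx_nil q a b (by omega), pvIdx_nil q (a+1) b (by omega)]
    rw [h1]
    exact pvIdx_run q b (a+1) c hlt (fun i h1i h2i => hq i (by omega) h2i)
  · have : a = c := by omega
    rw [this]
termination_by c - a

-- facts about the inner run-skipping loop
theorem pvSkip_le (arr : List Int) (n : Nat) (flag : Bool) (j : Nat) (hj : j ≤ n) :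
    pvSkipRun arr n flag j ≤ n := by
  unfold pvSkipRun
  split
  · exact pvSkip_le arr n flag (j+1) (by omega)
  · exact hj
termination_by n - j
decreasing_by omega

theorem pvSkip_inside (arr : List Int) (n : Nat) (flag : Bool) (j i : Nat)
    (hij : j ≤ i) (hik : i < pvSkipRun arr n flag j) : pvFlag arr i = flag := by
  unfold pvSkipRun at hik
  split at hik
  · next h =>
    rcases Nat.eq_or_lt_of_le hij with heq | hlt
    · subst heq
      have := h.2
      simpa [pvFlag] using this
    · exact pvSkip_inside arr n flag (j+1) i hlt hik
  · omega
termination_by n - j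
decreasing_by omega

theorem pvSkip_stop (arr : List Int) (n : Nat) (flag : Bool) (j : Nat) :
    pvSkipRun arr n flag j < n → pvFlag arr (pvSkipRun arr n flag j) ≠ flag := by
  unfold pvSkipRun
  split
  · exact pvSkip_stop arr n flag (j+1)
  · next hc =>
    intro hn hflag
    exact hc ⟨hn, by simpa [pvFlag] using hflag⟩
termination_by n - j
decreasing_by omega

-- the A loop over range(len-1) computes exactly the boundary-index lists
theorem pvA_loop (arr : List Int) (m : Nat) (s e : List Int) :
    ((List.range m).map (fun k => ((k : Nat) : Int))).foldl
      (fun (st : List Int × List Int) i =>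
        if PySem.List.pyGetD arr i 0 ≥ 1 ∧ PySem.List.pyGetD arr (i+1) 0 < 1 then
          (st.1 ++ [i+1], st.2)
        else if PySem.List.pyGetD arr i 0 < 1 ∧ PySem.List.pyGetD arr (i+1) 0 ≥ 1 then
          (st.1, st.2 ++ [i+1])
        else st) (s, e)
    = (s ++ pvIdx (pvQS arr) 0 m, e ++ pvIdx (pvQE arr) 0 m) := by
  induction m with
  | zero => simp [pvIdx]
  | succ m ih =>
    rw [List.range_succ, List.map_append, List.foldl_append, ih,
        pvIdx_concat (pvQS arr) 0 m (by omega), pvIdx_concat (pvQE arr) 0 m (by omega)]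
    simp only [List.map_cons, List.map_nil, List.foldl_cons, List.foldl_nil]
    have h1 : PySem.List.pyGetD arr ((m : Nat) : Int) 0 = arr.getD m 0 := by
      rw [PySem.List.pyGetD_natCast]
    have h2 : PySem.List.pyGetD arr (((m : Nat) : Int) + 1) 0 = arr.getD (m+1) 0 := by
      rw [show ((m : Nat) : Int) + 1 = (((m+1 : Nat)) : Int) by omega,
          PySem.List.pyGetD_natCast]
    rw [h1, h2]
    by_cases hA : (1 : Int) ≤ arr.getD m 0 <;> by_cases hB : (1 : Int) ≤ arr.getD (m+1) 0
    · have hfm : pvFlag arr m = true := by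
        unfold pvFlag; simp only [ge_iff_le, decide_eq_true_eq]; exact hA
      have hfm1 : pvFlag arr (m+1) = true := by
        unfold pvFlag; simp only [ge_iff_le, decide_eq_true_eq]; exact hB
      rw [if_neg (by omega), if_neg (by omega)]
      have hS : pvQS arr m = false := by unfold pvQS; rw [hfm, hfm1]; rfl
      have hE : pvQE arr m = false := by unfold pvQE; rw [hfm, hfm1]; rfl
      simp [hS, hE]
    · have hfm : pvFlag arr m = true := by
        unfold pvFlag; simp only [ge_iff_le, decide_eq_true_eq]; exact hA
      have hfm1 : pvFlag arr (m+1) = false := by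
        unfold pvFlag; simp only [ge_iff_le, decide_eq_false_iff_not]; exact hB
      rw [if_pos ⟨by omega, by omega⟩]
      have hS : pvQS arr m = true := by unfold pvQS; rw [hfm, hfm1]; rfl
      have hE : pvQE arr m = false := by unfold pvQE; rw [hfm, hfm1]; rfl
      simp [hS, hE]
    · have hfm : pvFlag arr m = false := by
        unfold pvFlag; simp only [ge_iff_le, decide_eq_false_iff_not]; exact hA
      have hfm1 : pvFlag arr (m+1) = true := by
        unfold pvFlag; simp only [ge_iff_le, decide_eq_true_eq]; exact hB
      rw [if_neg (by omega), if_pos ⟨by omega, by omega⟩]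
      have hS : pvQS arr m = false := by unfold pvQS; rw [hfm, hfm1]; rfl
      have hE : pvQE arr m = true := by unfold pvQE; rw [hfm, hfm1]; rfl
      simp [hS, hE]
    · have hfm : pvFlag arr m = false := by
        unfold pvFlag; simp only [ge_iff_le, decide_eq_false_iff_not]; exact hA
      have hfm1 : pvFlag arr (m+1) = false := by
        unfold pvFlag; simp only [ge_iff_le, decide_eq_false_iff_not]; exact hB
      rw [if_neg (by omega), if_neg (by omega)]
      have hS : pvQS arr m = false := by unfold pvQS; rw [hfm, hfm1]; rfl
      have hE : pvQE arr m = false := by unfold pvQE; rw [hfm, hfm1]; rfl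
      simp [hS, hE]

-- one unfolding of the outer B loop (zeta-reduced form of its body)
theorem pvOuter_step (arr : List Int) (n pos : Nat) (s e : List Int) (h : pos < n) :
    pvOuter arr n pos s e =
      (if pvSkipRun arr n (pvFlag arr pos) (pos+1) < n then
        if pvFlag arr pos then
          pvOuter arr n (pvSkipRun arr n (pvFlag arr pos) (pos+1))
            (s ++ [(pvSkipRun arr n (pvFlag arr pos) (pos+1) : Int)]) e
        else
          pvOuter arr n (pvSkipRun arr n (pvFlag arr pos) (pos+1))
            s (e ++ [(pvSkipRun arr n (pvFlag arr pos) (pos+1) : Int)])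
      else pvOuter arr n (pvSkipRun arr n (pvFlag arr pos) (pos+1)) s e) := by
  have hfl : pvFlag arr pos = decide (PySem.List.pyGetD arr (pos : Int) 0 ≥ 1) := by
    simp [pvFlag, List.getD]
  rw [pvOuter, dif_pos h, hfl]

-- the B outer loop appends the same boundary-index lists, run by run
theorem pvOuter_spec (arr : List Int) (pos : Nat) (s e : List Int)
    (hpos : pos ≤ arr.length) :
    pvOuter arr arr.length pos s e
      = (s ++ pvIdx (pvQS arr) pos (arr.length - 1),
         e ++ pvIdx (pvQE arr) pos (arr.length - 1)) := by
  rcases Nat.lt_or_ge pos arr.length with h | h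
  · rw [pvOuter_step arr arr.length pos s e h]
    have hk1 : pos + 1 ≤ pvSkipRun arr arr.length (pvFlag arr pos) (pos+1) :=
      pvSkipRun_lt arr arr.length (pvFlag arr pos) (pos+1)
    have hk2 : pvSkipRun arr arr.length (pvFlag arr pos) (pos+1) ≤ arr.length :=
      pvSkip_le arr arr.length (pvFlag arr pos) (pos+1) (by omega)
    have hrun : ∀ i, pos ≤ i → i < pvSkipRun arr arr.length (pvFlag arr pos) (pos+1) →
        pvFlag arr i = pvFlag arr pos := by
      intro i h1i h2i
      rcases Nat.eq_or_lt_of_le h1i with heq | hlt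
      · rw [← heq]
      · exact pvSkip_inside arr arr.length (pvFlag arr pos) (pos+1) i hlt h2i
    have hqS : ∀ i, pos ≤ i → i < pvSkipRun arr arr.length (pvFlag arr pos) (pos+1) - 1 →
        pvQS arr i = false := by
      intro i h1i h2i
      have e1 := hrun i h1i (by omega)
      have e2 := hrun (i+1) (by omega) (by omega)
      unfold pvQS
      rw [e1, e2]
      cases pvFlag arr pos <;> simp
    have hqE : ∀ i, pos ≤ i → i < pvSkipRun arr arr.length (pvFlag arr pos) (pos+1) - 1 →
        pvQE arr i = false := by
      intro i h1i h2i
      have e1 := hrun i h1i (by omega)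
      have e2 := hrun (i+1) (by omega) (by omega)
      unfold pvQE
      rw [e1, e2]
      cases pvFlag arr pos <;> simp
    split
    · next hkn =>
      have hstop := pvSkip_stop arr arr.length (pvFlag arr pos) (pos+1) hkn
      have hkm : pvFlag arr (pvSkipRun arr arr.length (pvFlag arr pos) (pos+1) - 1)
          = pvFlag arr pos := hrun _ (by omega) (by omega)
      have hknot : pvFlag arr (pvSkipRun arr arr.length (pvFlag arr pos) (pos+1))
          = !(pvFlag arr pos) := by
        revert hstop
        cases pvFlag arr (pvSkipRun arr arr.length (pvFlag arr pos) (pos+1)) <;>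
          cases pvFlag arr pos <;> simp
      have hcast : ((pvSkipRun arr arr.length (pvFlag arr pos) (pos+1) - 1 : Nat) : Int) + 1
          = ((pvSkipRun arr arr.length (pvFlag arr pos) (pos+1) : Nat) : Int) := by omega
      have hS : pvIdx (pvQS arr) pos (arr.length - 1)
          = (if pvFlag arr pos then
              [((pvSkipRun arr arr.length (pvFlag arr pos) (pos+1) : Nat) : Int)] else [])
            ++ pvIdx (pvQS arr) (pvSkipRun arr arr.length (pvFlag arr pos) (pos+1))
                (arr.length - 1) := by
        rw [pvIdx_run (pvQS arr) (arr.length - 1) pos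
              (pvSkipRun arr arr.length (pvFlag arr pos) (pos+1) - 1) (by omega) hqS,
            pvIdx_cons (pvQS arr) _ (arr.length - 1) (by omega),
            show pvSkipRun arr arr.length (pvFlag arr pos) (pos+1) - 1 + 1
              = pvSkipRun arr arr.length (pvFlag arr pos) (pos+1) by omega]
        have : pvQS arr (pvSkipRun arr arr.length (pvFlag arr pos) (pos+1) - 1)
            = pvFlag arr pos := by
          unfold pvQS
          rw [show pvSkipRun arr arr.length (pvFlag arr pos) (pos+1) - 1 + 1
                = pvSkipRun arr arr.length (pvFlag arr pos) (pos+1) by omega,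
              hkm, hknot]
          cases pvFlag arr pos <;> simp
        rw [this, hcast]
      have hE : pvIdx (pvQE arr) pos (arr.length - 1)
          = (if pvFlag arr pos then []
             else [((pvSkipRun arr arr.length (pvFlag arr pos) (pos+1) : Nat) : Int)])
            ++ pvIdx (pvQE arr) (pvSkipRun arr arr.length (pvFlag arr pos) (pos+1))
                (arr.length - 1) := by
        rw [pvIdx_run (pvQE arr) (arr.length - 1) pos
              (pvSkipRun arr arr.length (pvFlag arr pos) (pos+1) - 1) (by omega) hqE,
            pvIdx_cons (pvQE arr) _ (arr.length - 1) (by omega),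
            show pvSkipRun arr arr.length (pvFlag arr pos) (pos+1) - 1 + 1
              = pvSkipRun arr arr.length (pvFlag arr pos) (pos+1) by omega]
        have : pvQE arr (pvSkipRun arr arr.length (pvFlag arr pos) (pos+1) - 1)
            = !(pvFlag arr pos) := by
          unfold pvQE
          rw [show pvSkipRun arr arr.length (pvFlag arr pos) (pos+1) - 1 + 1
                = pvSkipRun arr arr.length (pvFlag arr pos) (pos+1) by omega,
              hkm, hknot]
          cases pvFlag arr pos <;> simp
        rw [this, hcast]
        cases pvFlag arr pos <;> simp
      rw [hS, hE]
      by_cases hflag : pvFlag arr pos = true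
      · rw [if_pos hflag, if_pos hflag, if_pos hflag,
            pvOuter_spec arr (pvSkipRun arr arr.length (pvFlag arr pos) (pos+1))
              (s ++ [((pvSkipRun arr arr.length (pvFlag arr pos) (pos+1) : Nat) : Int)]) e hk2]
        simp
      · rw [if_neg hflag, if_neg hflag, if_neg hflag,
            pvOuter_spec arr (pvSkipRun arr arr.length (pvFlag arr pos) (pos+1))
              s (e ++ [((pvSkipRun arr arr.length (pvFlag arr pos) (pos+1) : Nat) : Int)]) hk2]
        simp
    · next hkn =>
      have hkeq : pvSkipRun arr arr.length (pvFlag arr pos) (pos+1) = arr.length := by omega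
      rw [pvOuter_spec arr (pvSkipRun arr arr.length (pvFlag arr pos) (pos+1)) s e hk2, hkeq,
          pvIdx_nil (pvQS arr) arr.length (arr.length - 1) (by omega),
          pvIdx_nil (pvQE arr) arr.length (arr.length - 1) (by omega),
          pvIdx_run (pvQS arr) (arr.length - 1) pos (arr.length - 1) (by omega)
            (fun i h1i h2i => hqS i h1i (by omega)),
          pvIdx_run (pvQE arr) (arr.length - 1) pos (arr.length - 1) (by omega)
            (fun i h1i h2i => hqE i h1i (by omega)),
          pvIdx_nil (pvQS arr) (arr.length - 1) (arr.length - 1) (by omega),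
          pvIdx_nil (pvQE arr) (arr.length - 1) (arr.length - 1) (by omega)]
  · rw [pvOuter, dif_neg (by omega),
        pvIdx_nil (pvQS arr) pos (arr.length - 1) (by omega),
        pvIdx_nil (pvQE arr) pos (arr.length - 1) (by omega)]
    simp
termination_by arr.length - pos
decreasing_by all_goals omega

-- A and B agree on every input
theorem pvEq (arr : List Int) : find_transitions arr = find_transitions_alt arr := by
  simp only [find_transitions, find_transitions_alt, PySem.List.len_eq]
  rw [PySem.List.pyRange_one]
  simp only [Int.sub_zero, zero_add]
  rw [show (((arr.length : Int) - 1)).toNat = arr.length - 1 by omega,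
      pvA_loop arr (arr.length - 1) [] [],
      pvOuter_spec arr 0 [] [] (by omega)]

-- ===== VERDICT (by name: the statement is the Claim_ definition above) =====
theorem find_transitions_spec : Claim_equal_find_transitions := by
  intro arr _
  unfold Spec_find_transitions
  exact pvEq arr
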